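-- pv_equiv track=rewrite | github.com/yasminaadel/Resolution | main.py | remove_extra_brackets
-- ===== SOURCE A (Python) =====
-- def remove_extra_brackets(expression):
--     # check if expression starts with open brackets and end with end ones
--     # check if brackets count are equal
--     while expression.startswith('(') and expression.endswith(')') and expression.count('(') == expression.count(')'):
--         possible_extra = expression[1:-1]  # remove outermost brackets
--         # insure there is no unmatched brackets
--         if possible_extra.count('(') == possible_extra.count(')'):
--             expression = possible_extra
--         else:
--             break
--     return expression
-- ===== SOURCE B (Python) =====
-- def remove_extra_brackets(expression):
--     # Single pass: one strip iteration removes exactly one '(' and one ')', so the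
--     # bracket counts stay equal; the loop therefore strips exactly
--     # min(leading-'('-run, trailing-')'-run) layers whenever the counts are equal.
--     if expression.count('(') != expression.count(')'):
--         return expression
--     n = len(expression)
--     k = 0
--     while k < n and expression[k] == '(':
--         k += 1
--     m = 0
--     while m < n and expression[n - 1 - m] == ')':
--         m += 1
--     t = min(k, m)
--     return expression[t:n - t]
-- ===== Notes on version B (the rewrite author's own statement) =====
-- stated objective: faster
-- what changed: A strips one bracket layer per loop iteration, re-counting both bracket kinds and re-slicing the whole string each time (quadratic); B checks the counts once and removes min(leading open-bracket run, trailing close-bracket run) layers with a single slice, since each strip step provably preserves count equality.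
import Mathlib
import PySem

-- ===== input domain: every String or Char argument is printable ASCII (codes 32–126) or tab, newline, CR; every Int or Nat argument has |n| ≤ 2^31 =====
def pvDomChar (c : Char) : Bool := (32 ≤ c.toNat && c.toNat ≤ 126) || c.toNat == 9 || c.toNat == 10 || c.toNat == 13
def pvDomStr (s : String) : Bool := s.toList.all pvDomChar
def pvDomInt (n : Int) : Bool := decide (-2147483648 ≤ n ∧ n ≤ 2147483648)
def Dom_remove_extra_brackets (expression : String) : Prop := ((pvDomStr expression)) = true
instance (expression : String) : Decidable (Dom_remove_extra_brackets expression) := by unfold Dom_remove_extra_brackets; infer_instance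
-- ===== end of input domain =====

-- B replaces A's repeated re-count-and-reslice loop by a single pass: one strip step
-- removes exactly one '(' and one ')', so the counts stay equal and the loop strips
-- exactly min(leading open-run, trailing close-run) layers, removed with one slice.

-- ===== PORT A =====
def remove_extra_brackets (expression : String) : String :=
  if h : (PySem.Str.startswith expression "(" && PySem.Str.endswith expression ")" &&
      (PySem.Str.count expression "(" == PySem.Str.count expression ")")) = true then
    let possible_extra := PySem.Str.slice expression (some 1) (some (-1))  -- expression[1:-1]
    if PySem.Str.count possible_extra "(" == PySem.Str.count possible_extra ")" then
      remove_extra_brackets possible_extra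
    else expression
  else expression
termination_by expression.toList.length
decreasing_by
  simp only [Bool.and_eq_true, PySem.Str.startswith_eq] at h
  have hpre : ('(' :: []) <+: expression.toList := (PySem.Chars.startswith_iff _ _).mp (by simpa using h.1.1)
  have hne : expression.toList ≠ [] := by
    rcases hpre with ⟨t, ht⟩; intro h0; rw [h0] at ht; simp at ht
  have hlen : 1 ≤ expression.toList.length := by
    cases hcs : expression.toList with
    | nil => exact absurd hcs hne
    | cons a l => simp
  simp only [PySem.Str.toList_slice, PySem.Chars.slice_eq_listSlice, PySem.List.length_slice,
    PySem.List.clampIdx]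
  split_ifs <;> omega

-- ===== PORT B =====
-- the while-loop 'while k < n and expression[k] == "(": k += 1' of Source B, scanning forward
def pvRunOpen : List Char → Nat
  | '(' :: rest => pvRunOpen rest + 1
  | _ => 0

-- the while-loop 'while m < n and expression[n-1-m] == ")": m += 1' of Source B, scanning backward
def pvRunClose : List Char → Nat
  | ')' :: rest => pvRunClose rest + 1
  | _ => 0

def remove_extra_brackets_alt (expression : String) : String :=
  if PySem.Str.count expression "(" ≠ PySem.Str.count expression ")" then
    expression
  else
    let n : Nat := expression.toList.length
    let k : Nat := pvRunOpen expression.toList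
    let m : Nat := pvRunClose expression.toList.reverse
    let t : Nat := min k m
    PySem.Str.slice expression (some (t : Int)) (some ((n : Int) - (t : Int)))  -- expression[t:n-t]

-- ===== PRECONDITION & SPEC =====
def Spec_remove_extra_brackets (expression : String) (out : String) : Prop := out = remove_extra_brackets_alt expression
instance (expression : String) (out : String) : Decidable (Spec_remove_extra_brackets expression out) := by unfold Spec_remove_extra_brackets; infer_instance

-- ===== CLAIM (what is proved, stated in full; the proofs are below) =====
def Claim_equal_remove_extra_brackets : Prop := ∀ (expression : String), Dom_remove_extra_brackets expression → Spec_remove_extra_brackets expression (remove_extra_brackets expression)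

-- ===== LEMMAS AND PROOFS =====

-- Python's s.count(sub) for a single-character sub is List.count
theorem pv_go_single (c : Char) : ∀ (fuel : Nat) (l : List Char) (acc : Nat), l.length ≤ fuel →
    PySem.Chars.count.go [c] fuel l acc = acc + l.count c
  | 0, [], acc, _ => by simp [PySem.Chars.count.go]
  | 0, x :: t, acc, h => by simp at h
  | fuel+1, [], acc, _ => by simp [PySem.Chars.count.go]
  | fuel+1, x :: t, acc, h => by
      have ht : t.length ≤ fuel := by simpa using h
      rw [PySem.Chars.count.go]
      by_cases hx : x = c
      · simp [hx, List.isPrefixOf, pv_go_single c fuel t _ ht]; omega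
      · simp [hx, List.isPrefixOf, pv_go_single c fuel t _ ht]
        exact fun h2 => hx h2.symm

theorem pv_count_single (s : List Char) (c : Char) : PySem.Chars.count s [c] = s.count c := by
  simp [PySem.Chars.count, pv_go_single c s.length s 0 le_rfl]

theorem pv_count_str (e : String) : PySem.Str.count e "(" = e.toList.count '(' := by
  rw [PySem.Str.count_eq]
  have h : ("(" : String).toList = ['('] := by decide
  rw [h, pv_count_single]

theorem pv_count_str' (e : String) : PySem.Str.count e ")" = e.toList.count ')' := by
  rw [PySem.Str.count_eq]
  have h : (")" : String).toList = [')'] := by decide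
  rw [h, pv_count_single]

-- Python's xs[1:-1] is tail-then-dropLast
theorem pv_slice_one_negone (xs : List Char) :
    PySem.List.slice xs (some 1) (some (-1)) = xs.tail.dropLast := by
  rcases xs with _ | ⟨a, l⟩
  · rfl
  · simp [PySem.List.slice, PySem.List.clampIdx, List.dropLast_eq_take]
    split_ifs <;> omega

theorem pvRunOpen_append_close (xs : List Char) : pvRunOpen (xs ++ [')']) = pvRunOpen xs := by
  induction xs with
  | nil => rfl
  | cons a l ih =>
      by_cases ha : a = '('
      · subst ha; simp [pvRunOpen, ih]
      · rw [List.cons_append, pvRunOpen, pvRunOpen] <;> simp [ha]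

theorem pvRunClose_append_open (xs : List Char) : pvRunClose (xs ++ ['(']) = pvRunClose xs := by
  induction xs with
  | nil => rfl
  | cons a l ih =>
      by_cases ha : a = ')'
      · subst ha; simp [pvRunClose, ih]
      · rw [List.cons_append, pvRunClose, pvRunClose] <;> simp [ha]

theorem pvRunOpen_le_count (xs : List Char) : pvRunOpen xs ≤ xs.count '(' := by
  induction xs with
  | nil => simp [pvRunOpen]
  | cons a l ih =>
      by_cases ha : a = '('
      · subst ha; simp [pvRunOpen, List.count_cons]; omega
      · rw [pvRunOpen] <;> simp [ha]

theorem pvRunClose_le_count (xs : List Char) : pvRunClose xs ≤ xs.count ')' := by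
  induction xs with
  | nil => simp [pvRunClose]
  | cons a l ih =>
      by_cases ha : a = ')'
      · subst ha; simp [pvRunClose, List.count_cons]; omega
      · rw [pvRunClose] <;> simp [ha]

theorem pv_count_pair_le_length (xs : List Char) : xs.count '(' + xs.count ')' ≤ xs.length := by
  induction xs with
  | nil => simp
  | cons a l ih => simp [List.count_cons]; split_ifs <;> simp_all <;> omega

theorem pvRunOpen_eq_zero (xs : List Char) (h : ∀ b t, xs = b :: t → b ≠ '(') : pvRunOpen xs = 0 := by
  cases xs with
  | nil => rfl
  | cons a l => rw [pvRunOpen]; simp [h a l rfl]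

theorem pvRunClose_eq_zero (xs : List Char) (h : ∀ b t, xs = b :: t → b ≠ ')') : pvRunClose xs = 0 := by
  cases xs with
  | nil => rfl
  | cons a l => rw [pvRunClose]; simp [h a l rfl]

-- a zero strip count leaves the string unchanged
theorem pv_alt_slice_zero (e : String) (h : pvRunOpen e.toList = 0 ∨ pvRunClose e.toList.reverse = 0) :
    PySem.Str.slice e (some ((min (pvRunOpen e.toList) (pvRunClose e.toList.reverse) : Nat) : Int))
      (some ((e.toList.length : Int) - ((min (pvRunOpen e.toList) (pvRunClose e.toList.reverse) : Nat) : Int))) = e := by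
  have ht : (min (pvRunOpen e.toList) (pvRunClose e.toList.reverse)) = 0 := by omega
  rw [ht]
  simp [PySem.Str.slice, PySem.List.slice_natCast]
  rw [List.take_of_length_le (by simp), String.ofList_toList]

-- one strip step of A commutes with B: alt('(' ++ mid ++ ')') = alt(mid) for balanced mid
theorem pv_alt_step (e pe : String) (mid : List Char)
    (hmid : e.toList = '(' :: mid ++ [')']) (hpe : pe.toList = mid)
    (hcm : mid.count '(' = mid.count ')') :
    remove_extra_brackets_alt e = remove_extra_brackets_alt pe := by
  have hcl : e.toList.count '(' = e.toList.count ')' := by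
    rw [hmid]; simp [List.count_cons, List.count_append]; omega
  have hk : pvRunOpen e.toList = pvRunOpen mid + 1 := by
    rw [hmid]
    show pvRunOpen ('(' :: (mid ++ [')'])) = _
    rw [pvRunOpen, pvRunOpen_append_close]
  have hrev : e.toList.reverse = ')' :: (mid.reverse ++ ['(']) := by
    rw [hmid]; simp
  have hm : pvRunClose e.toList.reverse = pvRunClose mid.reverse + 1 := by
    rw [hrev, pvRunClose, pvRunClose_append_open]
  have hkb : pvRunOpen mid ≤ mid.count '(' := pvRunOpen_le_count mid
  have hmb : pvRunClose mid.reverse ≤ mid.count ')' := by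
    have h2 := pvRunClose_le_count mid.reverse
    rwa [List.count_reverse] at h2
  have hsum : mid.count '(' + mid.count ')' ≤ mid.length := pv_count_pair_le_length mid
  have hlen2 : e.toList.length = mid.length + 2 := by rw [hmid]; simp
  rw [remove_extra_brackets_alt, remove_extra_brackets_alt]
  rw [if_neg (by rw [pv_count_str, pv_count_str']; omega),
      if_neg (by rw [pv_count_str, pv_count_str', hpe]; omega)]
  dsimp only
  rw [hk, hm, hlen2, hpe]
  set t := min (pvRunOpen mid) (pvRunClose mid.reverse) with hts
  have hkt : t ≤ pvRunOpen mid := min_le_left _ _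
  have hmt : t ≤ pvRunClose mid.reverse := min_le_right _ _
  have h2t : 2 * t ≤ mid.length := by omega
  have hmin : min (pvRunOpen mid + 1) (pvRunClose mid.reverse + 1) = t + 1 := by omega
  rw [hmin]
  have hcast1 : ((mid.length : Int)) - ((t : Nat) : Int) = (((mid.length - t : Nat)) : Int) := by omega
  have hcast2 : (((mid.length + 2 : Nat) : Int)) - (((t + 1 : Nat)) : Int) = (((mid.length + 1 - t : Nat)) : Int) := by push_cast; omega
  rw [PySem.Str.slice, PySem.Str.slice]
  rw [PySem.Chars.slice_eq_listSlice, PySem.Chars.slice_eq_listSlice]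
  rw [hcast1, hcast2]
  rw [PySem.List.slice_natCast, PySem.List.slice_natCast]
  congr 1
  rw [hmid]
  have hdrop : ('(' :: mid ++ [')']).drop (t + 1) = mid.drop t ++ [')'] := by
    show ('(' :: (mid ++ [')'])).drop (t + 1) = _
    rw [List.drop_succ_cons, List.drop_append_of_le_length (by omega)]
  rw [hdrop]
  rw [List.take_append_of_le_length (by simp; omega), hpe]
  congr 1
  omega

-- the main equivalence, by strong induction on the string length
theorem pv_main : ∀ (n : Nat) (e : String), e.toList.length ≤ n →
    remove_extra_brackets e = remove_extra_brackets_alt e := by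
  intro n
  induction n with
  | zero =>
      intro e he
      have hnil : e.toList = [] := List.eq_nil_of_length_eq_zero (Nat.le_zero.mp he)
      rw [remove_extra_brackets]
      rw [dif_neg (by simp [PySem.Str.startswith_eq, PySem.Chars.startswith, hnil])]
      rw [remove_extra_brackets_alt]
      rw [if_neg (by rw [pv_count_str, pv_count_str', hnil]; simp)]
      dsimp only
      exact (pv_alt_slice_zero e (Or.inl (by rw [hnil]; rfl))).symm
  | succ n ih =>
      intro e he
      rw [remove_extra_brackets]
      by_cases hg : (PySem.Str.startswith e "(" && PySem.Str.endswith e ")" &&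
          (PySem.Str.count e "(" == PySem.Str.count e ")")) = true
      · -- guard true: e.toList = '(' :: mid ++ [')'] with equal counts
        rw [dif_pos hg]
        simp only [Bool.and_eq_true, beq_iff_eq] at hg
        obtain ⟨⟨hs, hsend⟩, hc⟩ := hg
        have hpre : ['('] <+: e.toList := by
          have h2 := (PySem.Chars.startswith_iff e.toList ("(" : String).toList).mp (by simpa [PySem.Str.startswith_eq] using hs)
          simpa using h2
        have hsuf : [')'] <:+ e.toList := by
          have h2 := (PySem.Chars.endswith_iff e.toList (")" : String).toList).mp (by simpa [PySem.Str.endswith_eq] using hsend)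
          simpa using h2
        obtain ⟨mid, hmid⟩ : ∃ mid, e.toList = '(' :: mid ++ [')'] := by
          obtain ⟨tl, ht⟩ := hpre
          obtain ⟨p, hp⟩ := hsuf
          cases p with
          | nil => rw [← hp] at ht; simp at ht
          | cons b p' =>
              have hb : b = '(' := by
                rw [← ht] at hp
                have h2 := congrArg (·.head?) hp
                simpa using h2
              exact ⟨p', by rw [← hp, hb]⟩
        have hcl : e.toList.count '(' = e.toList.count ')' := by
          rw [pv_count_str, pv_count_str'] at hc; exact hc
        have hcm : mid.count '(' = mid.count ')' := by
          rw [hmid] at hcl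
          simp [List.count_append] at hcl
          omega
        set pe := PySem.Str.slice e (some 1) (some (-1)) with hpe_def
        have hpe : pe.toList = mid := by
          rw [hpe_def, PySem.Str.toList_slice]
          rw [PySem.Chars.slice_eq_listSlice, pv_slice_one_negone, hmid]
          simp
        have hcpe : (PySem.Str.count pe "(" == PySem.Str.count pe ")") = true := by
          rw [pv_count_str, pv_count_str', hpe]
          simpa using hcm
        rw [if_pos hcpe]
        have hlen : pe.toList.length ≤ n := by
          have h2 : e.toList.length = mid.length + 2 := by rw [hmid]; simp
          rw [hpe]
          omega
        rw [ih pe hlen]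
        exact (pv_alt_step e pe mid hmid hpe hcm).symm
      · rw [dif_neg hg]
        rw [remove_extra_brackets_alt]
        by_cases hcnt : PySem.Str.count e "(" ≠ PySem.Str.count e ")"
        · rw [if_pos hcnt]
        · rw [if_neg hcnt]
          dsimp only
          push_neg at hcnt
          refine (pv_alt_slice_zero e ?_).symm
          rw [Bool.and_eq_true, Bool.and_eq_true] at hg
          push_neg at hg
          by_cases hs : PySem.Str.startswith e "(" = true
          · by_cases hend : PySem.Str.endswith e ")" = true
            · exact absurd (by simpa using hcnt) (hg ⟨hs, hend⟩)
            · refine Or.inr (pvRunClose_eq_zero _ ?_)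
              intro b t hbt hb
              apply hend
              rw [PySem.Str.endswith_eq, (PySem.Chars.endswith_iff _ _)]
              have h3 : e.toList = t.reverse ++ [b] := by
                have h4 := congrArg List.reverse hbt
                simpa using h4
              rw [h3, hb]
              simp
          · refine Or.inl (pvRunOpen_eq_zero _ ?_)
            intro b t hbt hb
            apply hs
            rw [PySem.Str.startswith_eq, (PySem.Chars.startswith_iff _ _)]
            rw [hbt, hb]
            simp

-- ===== VERDICT (by name: the statement is the Claim_ definition above) =====
theorem remove_extra_brackets_spec : Claim_equal_remove_extra_brackets := by
  intro e _
  unfold Spec_remove_extra_brackets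
  exact pv_main e.toList.length e le_rfl
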